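-- pv_equiv track=rewrite | github.com/926-Serban-Alexandru/block_manager | functions.py | list_total_expenses_type
-- ===== SOURCE A (Python) =====
-- def get_ap(elements, type, i):
--     """
--   elements - dictionary
--   type - string in "water" / "apartaments" /..
--   i - integer - index
--   """
--     return elements[type][i]
--
-- def calculate_total_expenses_type(params_list, elements):
--     """
--   A function that calculates the total expenses for a certain type (water, gas etc.)
--   :param params_list: a list of parameters, strings, params_list
--   :param elements: a dictionary elements
--   :return: an integer amount, representing the total expenses for the input type
--   """
--     amount = 0  # The total amount of expenses.
--     if len(params_list) == 1:
--         if params_list[0] in elements: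
--             for i in range(len(elements["apartaments"])):
--                 expense = get_ap(elements, params_list[0], i)
--                 amount += expense
--             return amount
--         else:
--             return False
--     else:
--         return False
--
-- def list_total_expenses_type(elements):
--     """
--   A function that creates a list of the total expenses for all types.
--   :param elements: a dictionary elements
--   :return: a list of integers: total_expenses
--   """
--     total_expenses = []
--     for type in elements:
--         if type != "apartaments":
--             params_list = [type]
--             amount = calculate_total_expenses_type(params_list, elements)
--             total_expenses.append(amount)
--     return total_expenses
-- ===== SOURCE B (Python) =====
-- def list_total_expenses_type(elements):
--     # Row-wise accumulation: one pass over apartment indices, updating all type totals in parallel.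
--     cols = [v for k, v in elements.items() if k != "apartaments"]
--     if not cols:
--         return []
--     acc = [0] * len(cols)
--     for i in range(len(elements["apartaments"])):
--         acc = [a + col[i] for a, col in zip(acc, cols)]
--     return acc
-- ===== Notes on version B (the rewrite author's own statement) =====
-- stated objective: alternative
-- what changed: Replaces A's per-type helper chain (an outer loop over dict keys calling a summation helper that re-looks-up the column and folds it) by a single row-wise pass: one parallel accumulator list updated for every apartment index, with the loops interchanged.
import Mathlib
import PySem

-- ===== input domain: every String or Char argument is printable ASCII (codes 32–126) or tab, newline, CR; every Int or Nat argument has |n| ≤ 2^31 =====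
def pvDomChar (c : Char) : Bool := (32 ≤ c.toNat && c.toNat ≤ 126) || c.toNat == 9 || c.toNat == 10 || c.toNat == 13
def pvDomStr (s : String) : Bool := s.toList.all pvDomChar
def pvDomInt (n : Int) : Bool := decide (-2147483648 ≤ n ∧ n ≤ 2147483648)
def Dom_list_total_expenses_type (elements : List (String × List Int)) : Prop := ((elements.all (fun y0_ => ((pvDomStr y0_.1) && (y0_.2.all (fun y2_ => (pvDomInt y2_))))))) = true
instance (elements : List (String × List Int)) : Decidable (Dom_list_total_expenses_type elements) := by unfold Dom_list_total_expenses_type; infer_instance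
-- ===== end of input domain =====

-- B replaces A's per-type (column-wise) helper chain by one row-wise pass that updates all
-- type totals in parallel (objective: alternative decomposition, same asymptotic cost).

-- ===== PORT A =====
-- elements[type][i]; in range under Pre_ (Python raises IndexError/KeyError otherwise)
def get_ap (elements : List (String × List Int)) (type_ : String) (i : Int) : Int :=
  ((PySem.List.pyGet? ((List.lookup type_ elements).getD []) i)).getD 0

def calculate_total_expenses_type (params_list : List String) (elements : List (String × List Int)) : Int :=
  let amount : Int := 0
  if params_list.length = 1 then
    if (List.lookup (params_list.getD 0 "") elements).isSome then
      (List.range ((List.lookup "apartaments" elements).getD []).length).foldl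
        (fun amount (i : Nat) => amount + get_ap elements (params_list.getD 0 "") (i : Int)) amount
    else 0  -- Python returns False here; unreachable from list_total_expenses_type (type always in elements)
  else 0    -- Python returns False here; unreachable from list_total_expenses_type

def list_total_expenses_type (elements : List (String × List Int)) : List Int :=
  elements.foldl
    (fun total_expenses p =>
      if p.1 != "apartaments" then
        total_expenses ++ [calculate_total_expenses_type [p.1] elements]
      else total_expenses) []

-- ===== PORT B =====
def list_total_expenses_type_alt (elements : List (String × List Int)) : List Int :=
  let cols := (elements.filter (fun p => p.1 != "apartaments")).map Prod.snd
  if cols.isEmpty then []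
  else
    (List.range ((List.lookup "apartaments" elements).getD []).length).foldl
      (fun acc (i : Nat) => List.zipWith (fun a col => a + (PySem.List.pyGet? col (i : Int)).getD 0) acc cols)
      (cols.map fun _ => (0 : Int))

-- ===== PRECONDITION & SPEC =====
-- Pre_ excludes duplicate keys (the argument is a Python dict, which cannot have them) and the
-- inputs where A raises: a dict with a non-"apartaments" key but no "apartaments" key (KeyError),
-- or a type column shorter than the "apartaments" list (IndexError).
def Pre_list_total_expenses_type (elements : List (String × List Int)) : Prop :=
  (elements.map Prod.fst).Nodup ∧
  ((∃ p ∈ elements, p.1 ≠ "apartaments") →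
    ("apartaments" ∈ elements.map Prod.fst ∧
     ∀ p ∈ elements, p.1 ≠ "apartaments" →
       ((List.lookup "apartaments" elements).getD []).length ≤ p.2.length))
instance (elements : List (String × List Int)) : Decidable (Pre_list_total_expenses_type elements) := by
  unfold Pre_list_total_expenses_type; infer_instance

def pvWitness_list_total_expenses_type : (List (String × List Int)) :=
  [("apartaments", [1, 2]), ("water", [3, 4]), ("gas", [5, 6])]

def Spec_list_total_expenses_type (elements : List (String × List Int)) (out : List Int) : Prop := out = list_total_expenses_type_alt elements
instance (elements : List (String × List Int)) (out : List Int) : Decidable (Spec_list_total_expenses_type elements out) := by unfold Spec_list_total_expenses_type; infer_instance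

-- ===== CLAIM (what is proved, stated in full; the proofs are below) =====
def Claim_equal_list_total_expenses_type : Prop := ∀ (elements : List (String × List Int)), Dom_list_total_expenses_type elements → Pre_list_total_expenses_type elements → Spec_list_total_expenses_type elements (list_total_expenses_type elements)

-- ===== LEMMAS AND PROOFS =====

-- first-match lookup finds the pair itself when keys are distinct
theorem lookup_of_mem_nodup {α : Type} (elements : List (String × α)) (p : String × α)
    (hnd : (elements.map Prod.fst).Nodup) (hp : p ∈ elements) :
    List.lookup p.1 elements = some p.2 := by
  induction elements with
  | nil => cases hp
  | cons q rest ih =>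
    simp only [List.map_cons, List.nodup_cons, List.mem_map] at hnd
    rcases List.mem_cons.mp hp with h | h
    · subst h; simp [List.lookup]
    · have hne : (p.1 == q.1) = false :=
        beq_eq_false_iff_ne.mpr (fun he => hnd.1 ⟨p, h, he⟩)
      simp only [List.lookup, hne]
      exact ih hnd.2 h

-- zipWith of a list with itself (no Mathlib lemma found for this shape)
theorem zipWith_self_eq_map {α β : Type} (f : α → α → β) (l : List α) :
    List.zipWith f l l = l.map (fun x => f x x) := by
  induction l with
  | nil => rfl
  | cons x xs ih => simp

-- loop interchange: folding zipWith-updates over rows equals mapping a per-column fold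
theorem interchange (cols : List (List Int)) (f : List Int → Nat → Int) (m : Nat)
    (g : List Int → Int) :
    (List.range m).foldl
      (fun acc i => List.zipWith (fun a col => a + f col i) acc cols) (cols.map g)
    = cols.map (fun col => (List.range m).foldl (fun a i => a + f col i) (g col)) := by
  induction m generalizing g with
  | zero => simp
  | succ m ih =>
    simp only [List.range_succ, List.foldl_append, List.foldl_cons, List.foldl_nil, ih g,
      List.zipWith_map_left, zipWith_self_eq_map]

-- ===== VERDICT (by name: the statement is the Claim_ definition above) =====
theorem list_total_expenses_type_spec : Claim_equal_list_total_expenses_type := by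
  intro elements _ hpre
  obtain ⟨hnd, _⟩ := hpre
  unfold Spec_list_total_expenses_type list_total_expenses_type list_total_expenses_type_alt
  rw [PySem.List.foldl_append_if]
  simp only [List.nil_append]
  rw [interchange ((elements.filter (fun p => p.1 != "apartaments")).map Prod.snd)
      (fun col i => (PySem.List.pyGet? col (i : Int)).getD 0)
      ((List.lookup "apartaments" elements).getD []).length (fun _ => (0 : Int))]
  by_cases hemp : ((elements.filter (fun p => p.1 != "apartaments")).map Prod.snd).isEmpty
  · rw [if_pos hemp]
    rw [List.isEmpty_iff, List.map_eq_nil_iff] at hemp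
    simp [hemp]
  · rw [if_neg hemp, List.map_map]
    apply List.map_congr_left
    intro p hp
    have hmem : p ∈ elements := List.mem_of_mem_filter hp
    have hkey : (p.1 != "apartaments") = true := (List.mem_filter.mp hp).2
    have hl := lookup_of_mem_nodup elements p hnd hmem
    unfold calculate_total_expenses_type
    simp [get_ap, hl]
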